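-- pv_equiv track=rewrite | github.com/angadsinghsandhu/Notes | Leetcode/Solutions/18 Org/meta/OA/not_equal.py | countNotEqualToFirstTwo
-- ===== SOURCE A (Python) =====
-- def countNotEqualToFirstTwo(numbers):
--     """
--     Counts all numbers in the array that are not equal to numbers[0] or numbers[1], if numbers[1] exists.
--
--     Args:
--         numbers (List[int]): An array of integers.
--
--     Returns:
--         int: The count of numbers not equal to numbers[0] or numbers[1].
--
--     Thought Process:
--     - Determine the values of numbers[0] and numbers[1] (if it exists).
--     - Iterate through the array and count the elements that are not equal to these values.
--     - Handle edge cases where the array has less than two elements.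
--
--     Time Complexity: O(n), where n is the length of the numbers array.
--     Space Complexity: O(1), as we use a constant amount of extra space.
--     """
--     if not numbers:
--         return 0
--
--     first_value = numbers[0]
--     second_value = numbers[1] if len(numbers) > 1 else None
--
--     count = 0
--     for num in numbers:
--         if num != first_value and (second_value is None or num != second_value):
--             count += 1
--
--     return count
-- ===== SOURCE B (Python) =====
-- def countNotEqualToFirstTwo(numbers):
--     if not numbers:
--         return 0
--     targets = {numbers[0]}
--     if len(numbers) > 1:
--         targets.add(numbers[1])
--     return len(numbers) - sum(numbers.count(t) for t in targets)
-- ===== Notes on version B (the rewrite author's own statement) =====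
-- stated objective: alternative
-- what changed: B computes the complement: it builds the set of excluded targets (first element, and second if present) and returns len(numbers) minus the total count of occurrences of those targets, instead of A's single filtering pass over the list.
import Mathlib
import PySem

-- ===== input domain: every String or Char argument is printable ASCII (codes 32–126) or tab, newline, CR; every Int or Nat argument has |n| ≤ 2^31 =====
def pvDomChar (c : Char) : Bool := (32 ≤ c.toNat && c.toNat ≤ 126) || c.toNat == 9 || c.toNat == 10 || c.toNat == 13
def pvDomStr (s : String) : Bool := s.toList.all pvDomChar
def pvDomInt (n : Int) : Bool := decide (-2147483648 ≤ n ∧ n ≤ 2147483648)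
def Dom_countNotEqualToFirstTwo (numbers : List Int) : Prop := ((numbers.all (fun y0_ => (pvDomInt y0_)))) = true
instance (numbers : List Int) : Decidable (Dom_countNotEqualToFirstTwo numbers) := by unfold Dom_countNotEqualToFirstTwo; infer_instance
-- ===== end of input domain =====

-- B replaces A's filtering pass by an equivalent complement computation (length minus
-- occurrences of the excluded targets); alternative decomposition, same return value.

-- ===== PORT A =====
def countNotEqualToFirstTwo (numbers : List Int) : Int :=
  if numbers = [] then 0
  else
    let first_value := numbers.headI
    let second_value : Option Int :=
      if numbers.length > 1 then PySem.List.pyGet? numbers 1 else none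
    numbers.foldl
      (fun count num =>
        if num ≠ first_value ∧ (second_value = none ∨ some num ≠ second_value) then count + 1
        else count) 0

-- ===== PORT B =====
def countNotEqualToFirstTwo_alt (numbers : List Int) : Int :=
  if numbers = [] then 0
  else
    let targets0 : PySem.Set Int := PySem.Set.ofList [numbers.headI]
    let targets : PySem.Set Int :=
      if numbers.length > 1 then PySem.Set.add targets0 ((PySem.List.pyGet? numbers 1).getD 0)
      else targets0
    (numbers.length : Int) -
      targets.foldl (fun acc t => acc + (PySem.List.count numbers t : Int)) 0

-- ===== PRECONDITION & SPEC =====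
def Spec_countNotEqualToFirstTwo (numbers : List Int) (out : Int) : Prop := out = countNotEqualToFirstTwo_alt numbers
instance (numbers : List Int) (out : Int) : Decidable (Spec_countNotEqualToFirstTwo numbers out) := by unfold Spec_countNotEqualToFirstTwo; infer_instance

-- ===== CLAIM (what is proved, stated in full; the proofs are below) =====
def Claim_equal_countNotEqualToFirstTwo : Prop := ∀ (numbers : List Int), Dom_countNotEqualToFirstTwo numbers → Spec_countNotEqualToFirstTwo numbers (countNotEqualToFirstTwo numbers)

-- ===== LEMMAS AND PROOFS =====

lemma foldA_one (x : Int) (l : List Int) (a : Int) :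
    l.foldl (fun c n => if n = x then c else c + 1) a
      = a + (l.countP (fun n => decide (n ≠ x)) : Int) := by
  induction l generalizing a with
  | nil => simp
  | cons b l ih =>
    by_cases h : b = x <;> simp [h, ih] <;> ring

lemma foldA_two (x y : Int) (l : List Int) (a : Int) :
    l.foldl (fun c n => if ¬n = x ∧ ¬n = y then c + 1 else c) a
      = a + (l.countP (fun n => decide (n ≠ x) && decide (n ≠ y)) : Int) := by
  induction l generalizing a with
  | nil => simp
  | cons b l ih =>
    by_cases hx : b = x <;> by_cases hy : b = y <;>
      simp [hx, hy, ih] <;> ring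

lemma length_count_one (x : Int) (l : List Int) :
    l.length = l.count x + l.countP (fun n => decide (n ≠ x)) := by
  induction l with
  | nil => simp
  | cons a l ih =>
    by_cases h : a = x <;>
      simp [List.count_cons, h, ih] <;> omega

lemma length_count_two (x y : Int) (hxy : x ≠ y) (l : List Int) :
    l.length = l.count x + l.count y +
      l.countP (fun n => decide (n ≠ x) && decide (n ≠ y)) := by
  induction l with
  | nil => simp
  | cons a l ih =>
    by_cases hx : a = x <;> by_cases hy : a = y <;>
      simp [List.count_cons, hx, hy, hxy, Ne.symm hxy, ih] <;> omega

-- ===== VERDICT (by name: the statement is the Claim_ definition above) =====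
theorem countNotEqualToFirstTwo_spec : Claim_equal_countNotEqualToFirstTwo := by
  intro numbers _
  unfold Spec_countNotEqualToFirstTwo countNotEqualToFirstTwo countNotEqualToFirstTwo_alt
  match numbers with
  | [] => simp
  | [x] =>
      simp [PySem.Set.ofList, PySem.Set.add, PySem.Set.contains, PySem.List.count_eq,
        List.count_cons]
  | x :: y :: rest =>
      by_cases hxy : x = y
      · subst hxy
        simp [PySem.Set.ofList, PySem.Set.add, PySem.Set.contains, PySem.List.count_eq,
          PySem.List.pyGet?, PySem.List.pyIdx?, List.count_cons]
        rw [foldA_one]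
        have := length_count_one x rest
        omega
      · simp [PySem.Set.ofList, PySem.Set.add, PySem.Set.contains, hxy, Ne.symm hxy,
          PySem.List.count_eq, PySem.List.pyGet?, PySem.List.pyIdx?, List.count_cons]
        rw [foldA_two]
        have := length_count_two x y hxy rest
        omega
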